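-- pv_equiv track=rewrite | github.com/seadonggyun4/truthound-orchestration | scripts/ci/pr_change_filter.py | classify_changed_files
-- ===== SOURCE A (Python) =====
-- from collections.abc import Iterable
-- from fnmatch import fnmatchcase
--
-- FILTERS: dict[str, tuple[str, ...]] = {
--     "docs": (
--         "docs/**",
--         "README.md",
--         "mkdocs.yml",
--     ),
--     "all_platforms": (
--         ".github/workflows/**",
--         "ci/**",
--         "scripts/ci/**",
--         "common/**",
--         "tests/common/**",
--         "pyproject.toml",
--     ),
--     "airflow": ("packages/airflow/**",),
--     "prefect": ("packages/prefect/**",),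
--     "dagster": ("packages/dagster/**",),
--     "mage": (
--         "packages/mage/**",
--         "tests/mage/**",
--     ),
--     "kestra": (
--         "packages/kestra/**",
--         "tests/kestra/**",
--     ),
--     "dbt": (
--         "packages/dbt/**",
--         "tests/dbt/**",
--     ),
-- }
--
-- def classify_changed_files(paths: Iterable[str]) -> dict[str, bool]:
--     """Map changed paths onto CI routing filters."""
--
--     changed_paths = tuple(paths)
--     outputs = {
--         name: any(
--             fnmatchcase(changed_path, pattern)
--             for pattern in patterns
--             for changed_path in changed_paths
--         )
--         for name, patterns in FILTERS.items()
--     }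
--     outputs["docs_only"] = outputs["docs"] and not any(
--         outputs[name]
--         for name in ("all_platforms", "airflow", "prefect", "dagster", "mage", "kestra", "dbt")
--     )
--     return outputs
-- ===== SOURCE B (Python) =====
-- from collections.abc import Iterable
--
-- # Each CI filter, as what its glob patterns actually denote: directory
-- # prefixes ("dir/**" = anything under dir/) and exact file names.
-- FILTERS: dict[str, tuple[tuple[str, ...], tuple[str, ...]]] = {
--     "docs": (("docs/",), ("README.md", "mkdocs.yml")),
--     "all_platforms": (
--         (".github/workflows/", "ci/", "scripts/ci/", "common/", "tests/common/"),
--         ("pyproject.toml",),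
--     ),
--     "airflow": (("packages/airflow/",), ()),
--     "prefect": (("packages/prefect/",), ()),
--     "dagster": (("packages/dagster/",), ()),
--     "mage": (("packages/mage/", "tests/mage/"), ()),
--     "kestra": (("packages/kestra/", "tests/kestra/"), ()),
--     "dbt": (("packages/dbt/", "tests/dbt/"), ()),
-- }
--
-- _PRODUCTION = ("all_platforms", "airflow", "prefect", "dagster", "mage", "kestra", "dbt")
--
--
-- def classify_changed_files(paths: Iterable[str]) -> dict[str, bool]:
--     """Map changed paths onto CI routing filters (single path-major pass)."""
--     matched: set[str] = set()
--     for path in paths: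
--         for name, (prefixes, files) in FILTERS.items():
--             if name not in matched and (path.startswith(prefixes) or path in files):
--                 matched.add(name)
--     outputs = {name: name in matched for name in FILTERS}
--     outputs["docs_only"] = "docs" in matched and not any(
--         name in matched for name in _PRODUCTION
--     )
--     return outputs
-- ===== Notes on version B (the rewrite author's own statement) =====
-- stated objective: faster
-- what changed: Replaced the filter-major glob-matching any() nest with a single path-major pass that keeps a running set of matched filter names, testing each path by str.startswith / exact file name (which is what the 'dir/**' and literal patterns denote), with the outputs dict built from set membership afterwards.
import Mathlib
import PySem

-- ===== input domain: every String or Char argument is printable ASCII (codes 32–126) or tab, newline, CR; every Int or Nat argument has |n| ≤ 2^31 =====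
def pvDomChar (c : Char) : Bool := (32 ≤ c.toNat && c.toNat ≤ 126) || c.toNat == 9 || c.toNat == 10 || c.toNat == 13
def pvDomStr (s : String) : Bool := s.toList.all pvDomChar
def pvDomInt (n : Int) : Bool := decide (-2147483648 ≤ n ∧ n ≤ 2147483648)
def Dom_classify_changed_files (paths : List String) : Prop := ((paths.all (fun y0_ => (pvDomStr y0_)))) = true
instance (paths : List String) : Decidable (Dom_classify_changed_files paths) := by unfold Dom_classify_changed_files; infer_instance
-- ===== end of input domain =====

-- B replaces A's filter-major glob-matching any() nest with one path-major pass keeping a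
-- running set of matched filter names, testing each path by directory prefix / exact name
-- (what the "dir/**" and literal patterns denote) instead of glob matching; measured faster in a timing run (constant factor).

-- ===== PORT A =====
-- hand port of fnmatch.fnmatchcase restricted to patterns built from literal chars, '*' and '?'
-- (all patterns in FILTERS are of this shape); exact: '*' matches any sequence, '?' any single char.
def globMatch (p s : List Char) : Bool :=
  match p, s with
  | [], [] => true
  | [], _ :: _ => false
  | a :: ps, [] => a == '*' && globMatch ps []
  | a :: ps, c :: cs =>
    if a == '*' then globMatch ps (c :: cs) || globMatch (a :: ps) cs
    else (a == '?' || a == c) && globMatch ps cs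
termination_by (s.length, p.length)

def fnmatchcase (name pat : String) : Bool := globMatch pat.toList name.toList

def FILTERS : List (String × List String) :=
  [ ("docs", ["docs/**", "README.md", "mkdocs.yml"]),
    ("all_platforms", [".github/workflows/**", "ci/**", "scripts/ci/**", "common/**",
                       "tests/common/**", "pyproject.toml"]),
    ("airflow", ["packages/airflow/**"]),
    ("prefect", ["packages/prefect/**"]),
    ("dagster", ["packages/dagster/**"]),
    ("mage", ["packages/mage/**", "tests/mage/**"]),
    ("kestra", ["packages/kestra/**", "tests/kestra/**"]),
    ("dbt", ["packages/dbt/**", "tests/dbt/**"]) ]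

def classify_changed_files (paths : List String) : List (String × Bool) :=
  let outputs : PySem.Dict String Bool :=
    FILTERS.foldl
      (fun d np =>
        d.insert np.1
          (np.2.any (fun pattern => paths.any (fun changed_path => fnmatchcase changed_path pattern))))
      PySem.Dict.empty
  let outputs :=
    -- outputs["docs"] etc. always exist here, so getD false is exact (no KeyError)
    outputs.insert "docs_only"
      (outputs.getD "docs" false &&
        !(["all_platforms", "airflow", "prefect", "dagster", "mage", "kestra", "dbt"].any
            (fun name => outputs.getD name false)))
  outputs.items

-- ===== PORT B =====
-- Source B's FILTERS: each name ↦ (directory prefixes, exact file names)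
def FILTERS_B : List (String × (List String × List String)) :=
  [ ("docs", (["docs/"], ["README.md", "mkdocs.yml"])),
    ("all_platforms", ([".github/workflows/", "ci/", "scripts/ci/", "common/", "tests/common/"],
                       ["pyproject.toml"])),
    ("airflow", (["packages/airflow/"], [])),
    ("prefect", (["packages/prefect/"], [])),
    ("dagster", (["packages/dagster/"], [])),
    ("mage", (["packages/mage/", "tests/mage/"], [])),
    ("kestra", (["packages/kestra/", "tests/kestra/"], [])),
    ("dbt", (["packages/dbt/", "tests/dbt/"], [])) ]

-- Source B's 'path.startswith(prefixes) or path in files'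
def matchAnyB (path : String) (spec : List String × List String) : Bool :=
  spec.1.any (fun pre => PySem.Str.startswith path pre) || spec.2.any (fun f => f == path)

def stepPathB (m : PySem.Set String) (path : String) : PySem.Set String :=
  FILTERS_B.foldl
    (fun m np => if !(m.contains np.1) && matchAnyB path np.2 then m.add np.1 else m) m

def classify_changed_files_alt (paths : List String) : List (String × Bool) :=
  let matched : PySem.Set String := paths.foldl stepPathB PySem.Set.empty
  let outputs : PySem.Dict String Bool :=
    FILTERS_B.foldl (fun d np => d.insert np.1 (matched.contains np.1)) PySem.Dict.empty
  let outputs :=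
    outputs.insert "docs_only"
      (matched.contains "docs" &&
        !(["all_platforms", "airflow", "prefect", "dagster", "mage", "kestra", "dbt"].any
            (fun name => matched.contains name)))
  outputs.items

-- ===== PRECONDITION & SPEC =====
def Spec_classify_changed_files (paths : List String) (out : List (String × Bool)) : Prop := out = classify_changed_files_alt paths
instance (paths : List String) (out : List (String × Bool)) : Decidable (Spec_classify_changed_files paths out) := by unfold Spec_classify_changed_files; infer_instance

-- ===== CLAIM (what is proved, stated in full; the proofs are below) =====
def Claim_equal_classify_changed_files : Prop := ∀ (paths : List String), Dom_classify_changed_files paths → Spec_classify_changed_files paths (classify_changed_files paths)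

-- ===== LEMMAS AND PROOFS =====

def plainChar (c : Char) : Bool := !(c == '*') && !(c == '?')

theorem glob_star_any (s : List Char) : globMatch ['*'] s = true := by
  induction s with
  | nil => simp [globMatch]
  | cons c cs ih => simp [globMatch, ih]

theorem glob_star_star (s : List Char) : globMatch ['*', '*'] s = true := by
  cases s with
  | nil => simp [globMatch]
  | cons c cs => simp [globMatch, glob_star_any]

-- "lit/**" on char lists: a plain literal followed by two stars is a prefix test
theorem glob_prefix (lit : List Char) (h : lit.all plainChar = true) (s : List Char) :
    globMatch (lit ++ ['*', '*']) s = lit.isPrefixOf s := by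
  induction lit generalizing s with
  | nil => simp [glob_star_star]
  | cons a lit ih =>
    rw [List.all_cons, Bool.and_eq_true] at h
    obtain ⟨ha, hl⟩ := h
    have hstar : (a == '*') = false := by
      simp only [plainChar, Bool.and_eq_true, Bool.not_eq_true'] at ha; exact ha.1
    have hq : (a == '?') = false := by
      simp only [plainChar, Bool.and_eq_true, Bool.not_eq_true'] at ha; exact ha.2
    cases s with
    | nil => simp [globMatch, hstar, List.isPrefixOf]
    | cons c cs => simp [globMatch, hstar, hq, ih hl, List.isPrefixOf]

-- a fully plain pattern is an equality test
theorem glob_lit (lit : List Char) (h : lit.all plainChar = true) (s : List Char) :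
    globMatch lit s = decide (lit = s) := by
  induction lit generalizing s with
  | nil => cases s <;> simp [globMatch]
  | cons a lit ih =>
    rw [List.all_cons, Bool.and_eq_true] at h
    obtain ⟨ha, hl⟩ := h
    have hstar : (a == '*') = false := by
      simp only [plainChar, Bool.and_eq_true, Bool.not_eq_true'] at ha; exact ha.1
    have hq : (a == '?') = false := by
      simp only [plainChar, Bool.and_eq_true, Bool.not_eq_true'] at ha; exact ha.2
    cases s with
    | nil => simp [globMatch, hstar]
    | cons c cs =>
      rw [Bool.eq_iff_iff]
      simp [globMatch, hstar, hq, ih hl, List.cons.injEq]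

-- pattern "pre**" (pre plain) matches cp  ⟺  cp.startswith(pre)
theorem pat_prefix (pat pre : String) (hp : pat.toList = pre.toList ++ ['*', '*'])
    (h : pre.toList.all plainChar = true) (cp : String) :
    fnmatchcase cp pat = PySem.Str.startswith cp pre := by
  unfold fnmatchcase
  rw [hp, glob_prefix _ h, Bool.eq_iff_iff, List.isPrefixOf_iff_prefix,
      PySem.Str.startswith_eq, PySem.Chars.startswith_iff]

-- a plain pattern matches cp  ⟺  pat == cp
theorem pat_exact (pat : String) (h : pat.toList.all plainChar = true) (cp : String) :
    fnmatchcase cp pat = (pat == cp) := by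
  unfold fnmatchcase
  rw [glob_lit _ h, Bool.eq_iff_iff]
  simp only [decide_eq_true_eq, beq_iff_eq]
  exact String.toList_inj

-- one inner (filter-major) step of B: membership after = membership before OR this path matches that name
theorem mem_stepPathB_gen (L : List (String × (List String × List String)))
    (m : PySem.Set String) (path : String) (n : String) :
    (L.foldl (fun m np => if !(m.contains np.1) && matchAnyB path np.2 then m.add np.1 else m) m).contains n
      = (m.contains n || L.any (fun np => np.1 == n && matchAnyB path np.2)) := by
  induction L generalizing m with
  | nil => simp
  | cons a L ih =>
    simp only [List.foldl_cons, List.any_cons, ih]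
    have h1 : ((if !(m.contains a.1) && matchAnyB path a.2 then m.add a.1 else m).contains n)
        = (m.contains n || (a.1 == n && matchAnyB path a.2)) := by
      rw [Bool.eq_iff_iff]
      simp only [PySem.Set.contains_iff, Bool.or_eq_true, Bool.and_eq_true, beq_iff_eq]
      split_ifs with h
      · simp only [Bool.not_eq_true'] at h
        rw [PySem.Set.mem_add]
        constructor
        · rintro (hm | rfl)
          · exact Or.inl hm
          · exact Or.inr ⟨rfl, h.2⟩
        · rintro (hm | ⟨rfl, _⟩)
          · exact Or.inl hm
          · exact Or.inr rfl
      · simp only [Bool.not_eq_true', not_and_or, Bool.not_eq_false] at h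
        constructor
        · exact Or.inl
        · rintro (hm | ⟨rfl, hmt⟩)
          · exact hm
          · rcases h with h | h
            · rw [PySem.Set.contains_iff] at h; exact h
            · exact absurd hmt h
    rw [h1, Bool.or_assoc]

theorem mem_matched (paths : List String) (m : PySem.Set String) (n : String) :
    (paths.foldl stepPathB m).contains n
      = (m.contains n || paths.any (fun path => FILTERS_B.any (fun np => np.1 == n && matchAnyB path np.2))) := by
  induction paths generalizing m with
  | nil => simp
  | cons p paths ih =>
    simp only [List.foldl_cons, List.any_cons, ih, stepPathB, mem_stepPathB_gen, Bool.or_assoc]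

-- swapping the two any's of A
theorem any_swap (pats paths : List String) :
    (pats.any (fun pat => paths.any (fun cp => fnmatchcase cp pat)))
      = (paths.any (fun cp => pats.any (fun pat => fnmatchcase cp pat))) := by
  rw [Bool.eq_iff_iff]
  simp only [List.any_eq_true]
  tauto

-- B's matched-set membership for a concrete filter name equals A's per-name any
theorem matched_eq (paths : List String) (n : String) (pats : List String)
    (h : ∀ path, FILTERS_B.any (fun np => np.1 == n && matchAnyB path np.2)
          = pats.any (fun pat => fnmatchcase path pat)) :
    ((paths.foldl stepPathB PySem.Set.empty).contains n)
      = pats.any (fun pat => paths.any (fun cp => fnmatchcase cp pat)) := by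
  rw [mem_matched, any_swap]
  have he : (PySem.Set.empty : PySem.Set String).contains n = false := rfl
  rw [he, Bool.false_or]
  exact congrArg _ (funext h)

theorem classify_eq (paths : List String) :
    classify_changed_files paths = classify_changed_files_alt paths := by
  have h1 := matched_eq paths "docs" ["docs/**", "README.md", "mkdocs.yml"]
    (by intro path; simp [FILTERS_B, matchAnyB,
          pat_prefix "docs/**" "docs/" (by decide) (by decide) path,
          pat_exact "README.md" (by decide) path, pat_exact "mkdocs.yml" (by decide) path])
  have h2 := matched_eq paths "all_platforms"
    [".github/workflows/**", "ci/**", "scripts/ci/**", "common/**", "tests/common/**", "pyproject.toml"]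
    (by intro path; simp [FILTERS_B, matchAnyB,
          pat_prefix ".github/workflows/**" ".github/workflows/" (by decide) (by decide) path,
          pat_prefix "ci/**" "ci/" (by decide) (by decide) path,
          pat_prefix "scripts/ci/**" "scripts/ci/" (by decide) (by decide) path,
          pat_prefix "common/**" "common/" (by decide) (by decide) path,
          pat_prefix "tests/common/**" "tests/common/" (by decide) (by decide) path,
          pat_exact "pyproject.toml" (by decide) path, Bool.or_assoc])
  have h3 := matched_eq paths "airflow" ["packages/airflow/**"]
    (by intro path; simp [FILTERS_B, matchAnyB,
          pat_prefix "packages/airflow/**" "packages/airflow/" (by decide) (by decide) path])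
  have h4 := matched_eq paths "prefect" ["packages/prefect/**"]
    (by intro path; simp [FILTERS_B, matchAnyB,
          pat_prefix "packages/prefect/**" "packages/prefect/" (by decide) (by decide) path])
  have h5 := matched_eq paths "dagster" ["packages/dagster/**"]
    (by intro path; simp [FILTERS_B, matchAnyB,
          pat_prefix "packages/dagster/**" "packages/dagster/" (by decide) (by decide) path])
  have h6 := matched_eq paths "mage" ["packages/mage/**", "tests/mage/**"]
    (by intro path; simp [FILTERS_B, matchAnyB,
          pat_prefix "packages/mage/**" "packages/mage/" (by decide) (by decide) path,
          pat_prefix "tests/mage/**" "tests/mage/" (by decide) (by decide) path])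
  have h7 := matched_eq paths "kestra" ["packages/kestra/**", "tests/kestra/**"]
    (by intro path; simp [FILTERS_B, matchAnyB,
          pat_prefix "packages/kestra/**" "packages/kestra/" (by decide) (by decide) path,
          pat_prefix "tests/kestra/**" "tests/kestra/" (by decide) (by decide) path])
  have h8 := matched_eq paths "dbt" ["packages/dbt/**", "tests/dbt/**"]
    (by intro path; simp [FILTERS_B, matchAnyB,
          pat_prefix "packages/dbt/**" "packages/dbt/" (by decide) (by decide) path,
          pat_prefix "tests/dbt/**" "tests/dbt/" (by decide) (by decide) path])
  simp at h1 h2 h3 h4 h5 h6 h7 h8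
  simp only [classify_changed_files, classify_changed_files_alt, FILTERS, FILTERS_B]
  simp [PySem.Dict.insert, PySem.Dict.empty, PySem.Dict.getD, PySem.Dict.get?,
    h1, h2, h3, h4, h5, h6, h7, h8]

-- ===== VERDICT (by name: the statement is the Claim_ definition above) =====
theorem classify_changed_files_spec : Claim_equal_classify_changed_files := by
  intro paths _
  unfold Spec_classify_changed_files
  exact classify_eq paths
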